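-- pv_equiv track=rewrite | github.com/dan-bigs/calcInputTest | mKAL_machining.py | mach_reverse
-- ===== SOURCE A (Python) =====
-- def mach_depth(diag,thk):
--     if diag < 950 and thk <=120:
--         mach_dep = 3
--     else:
--         if diag < 1500 and thk <= 120:
--             mach_dep = 4
--         else: mach_dep = 5
--     return mach_dep
--
-- def mach_reverse(sides,diag,thk):
--     tot_add = mach_depth(diag,thk)*sides
--     final_thk = tot_add + thk
--     while final_thk % 5 != 0:
--         final_thk += 1
--     if final_thk > 100:
--         while final_thk % 10 != 0:
--             final_thk += 1
--     return final_thk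
-- ===== SOURCE B (Python) =====
-- def mach_reverse(sides, diag, thk):
--     d = 3 if (diag < 950 and thk <= 120) else (4 if (diag < 1500 and thk <= 120) else 5)
--     f = thk + d * sides
--     f = ((f + 4) // 5) * 5          # round up to the next multiple of 5
--     if f > 100:
--         f = ((f + 9) // 10) * 10    # round up to the next multiple of 10
--     return f
-- ===== Notes on version B (the rewrite author's own statement) =====
-- stated objective: simpler
-- what changed: Replaced the two increment-until-divisible while loops by closed-form ceiling arithmetic ((f+4)//5*5 and (f+9)//10*10) and inlined mach_depth as a conditional expression.
import Mathlib
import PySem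

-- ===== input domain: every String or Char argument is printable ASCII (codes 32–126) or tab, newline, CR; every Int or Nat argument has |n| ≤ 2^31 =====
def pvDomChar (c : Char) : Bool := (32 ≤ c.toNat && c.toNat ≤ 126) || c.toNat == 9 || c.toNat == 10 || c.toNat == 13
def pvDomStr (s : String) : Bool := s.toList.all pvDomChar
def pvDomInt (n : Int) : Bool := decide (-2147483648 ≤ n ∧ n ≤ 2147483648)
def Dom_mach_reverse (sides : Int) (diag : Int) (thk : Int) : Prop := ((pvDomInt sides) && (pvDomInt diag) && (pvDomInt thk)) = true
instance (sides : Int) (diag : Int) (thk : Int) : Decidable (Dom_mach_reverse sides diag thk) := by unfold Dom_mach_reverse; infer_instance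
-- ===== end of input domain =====

-- B replaces A's two increment-until-divisible while loops by closed-form ceiling arithmetic (simpler).

-- ===== PORT A =====
def mach_depth (diag : Int) (thk : Int) : Int :=
  if diag < 950 ∧ thk ≤ 120 then 3
  else if diag < 1500 ∧ thk ≤ 120 then 4
  else 5

-- `while final_thk % 5 != 0: final_thk += 1` (Python % with positive divisor);
-- the Nat argument is fuel guaranteeing totality: the loop runs at most 4 times, fuel 5 is exact
def pvWhile5 : Nat → Int → Int
  | 0, f => f
  | n + 1, f => if PySem.Int.mod f 5 ≠ 0 then pvWhile5 n (f + 1) else f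

-- `while final_thk % 10 != 0: final_thk += 1` (at most 9 iterations, fuel 10 is exact)
def pvWhile10 : Nat → Int → Int
  | 0, f => f
  | n + 1, f => if PySem.Int.mod f 10 ≠ 0 then pvWhile10 n (f + 1) else f

def mach_reverse (sides : Int) (diag : Int) (thk : Int) : Int :=
  let tot_add := mach_depth diag thk * sides
  let final_thk := tot_add + thk
  let final_thk := pvWhile5 5 final_thk
  if final_thk > 100 then pvWhile10 10 final_thk else final_thk

-- ===== PORT B =====
def mach_reverse_alt (sides : Int) (diag : Int) (thk : Int) : Int :=
  let d : Int := if diag < 950 ∧ thk ≤ 120 then 3 else if diag < 1500 ∧ thk ≤ 120 then 4 else 5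
  let f := thk + d * sides
  let f := PySem.Int.floordiv (f + 4) 5 * 5
  if f > 100 then PySem.Int.floordiv (f + 9) 10 * 10 else f

-- ===== PRECONDITION & SPEC =====
def Spec_mach_reverse (sides : Int) (diag : Int) (thk : Int) (out : Int) : Prop := out = mach_reverse_alt sides diag thk
instance (sides : Int) (diag : Int) (thk : Int) (out : Int) : Decidable (Spec_mach_reverse sides diag thk out) := by unfold Spec_mach_reverse; infer_instance

-- ===== CLAIM (what is proved, stated in full; the proofs are below) =====
def Claim_equal_mach_reverse : Prop := ∀ (sides : Int) (diag : Int) (thk : Int), Dom_mach_reverse sides diag thk → Spec_mach_reverse sides diag thk (mach_reverse sides diag thk)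

-- ===== LEMMAS AND PROOFS =====

theorem pvWhile5_eq (f : Int) : pvWhile5 5 f = PySem.Int.floordiv (f + 4) 5 * 5 := by
  have key : ∀ (n : Nat) (f : Int), ((5 - PySem.Int.mod f 5) % 5).toNat ≤ n →
      pvWhile5 n f = PySem.Int.floordiv (f + 4) 5 * 5 := by
    intro n
    induction n with
    | zero =>
      intro f hf
      simp only [pvWhile5]
      simp only [PySem.Int.mod_eq_emod_of_pos (by norm_num : (0:Int) < 5),
        PySem.Int.floordiv_eq_ediv_of_pos (by norm_num : (0:Int) < 5)] at *
      omega
    | succ n ih =>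
      intro f hf
      simp only [pvWhile5]
      split
      · rename_i h
        rw [ih (f + 1) ?_]
        · simp only [PySem.Int.mod_eq_emod_of_pos (by norm_num : (0:Int) < 5),
            PySem.Int.floordiv_eq_ediv_of_pos (by norm_num : (0:Int) < 5)] at *
          omega
        · simp only [PySem.Int.mod_eq_emod_of_pos (by norm_num : (0:Int) < 5)] at *
          omega
      · rename_i h
        simp only [PySem.Int.mod_eq_emod_of_pos (by norm_num : (0:Int) < 5),
          PySem.Int.floordiv_eq_ediv_of_pos (by norm_num : (0:Int) < 5)] at *
        omega
  exact key 5 f (by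
    simp only [PySem.Int.mod_eq_emod_of_pos (by norm_num : (0:Int) < 5)]
    omega)

theorem pvWhile10_eq (f : Int) : pvWhile10 10 f = PySem.Int.floordiv (f + 9) 10 * 10 := by
  have key : ∀ (n : Nat) (f : Int), ((10 - PySem.Int.mod f 10) % 10).toNat ≤ n →
      pvWhile10 n f = PySem.Int.floordiv (f + 9) 10 * 10 := by
    intro n
    induction n with
    | zero =>
      intro f hf
      simp only [pvWhile10]
      simp only [PySem.Int.mod_eq_emod_of_pos (by norm_num : (0:Int) < 10),
        PySem.Int.floordiv_eq_ediv_of_pos (by norm_num : (0:Int) < 10)] at *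
      omega
    | succ n ih =>
      intro f hf
      simp only [pvWhile10]
      split
      · rename_i h
        rw [ih (f + 1) ?_]
        · simp only [PySem.Int.mod_eq_emod_of_pos (by norm_num : (0:Int) < 10),
            PySem.Int.floordiv_eq_ediv_of_pos (by norm_num : (0:Int) < 10)] at *
          omega
        · simp only [PySem.Int.mod_eq_emod_of_pos (by norm_num : (0:Int) < 10)] at *
          omega
      · rename_i h
        simp only [PySem.Int.mod_eq_emod_of_pos (by norm_num : (0:Int) < 10),
          PySem.Int.floordiv_eq_ediv_of_pos (by norm_num : (0:Int) < 10)] at *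
        omega
  exact key 10 f (by
    simp only [PySem.Int.mod_eq_emod_of_pos (by norm_num : (0:Int) < 10)]
    omega)

-- ===== VERDICT (by name: the statement is the Claim_ definition above) =====
theorem mach_reverse_spec : Claim_equal_mach_reverse := by
  intro sides diag thk _
  unfold Spec_mach_reverse mach_reverse mach_reverse_alt mach_depth
  simp only [pvWhile5_eq, pvWhile10_eq]
  have e : ∀ c : Int, c * sides + thk = thk + c * sides := fun c => by ring
  simp only [e]
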